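-- pv_equiv track=rewrite | github.com/henry921009/KG_RL_pipeline | data_utils.py | find_relation_by_question
-- ===== SOURCE A (Python) =====
-- def find_relation_by_question(question_type, question_focus, relations):
--     """
--     Find possible relationships based on question type and focus
--
--     Parameters:
--         question_type (str): Question type
--         question_focus (str): Question focus
--         relations (list): List of relations
--
--     Returns:
--         list: List of possible relations sorted by relevance
--     """
--     relevant_relations = []
--
--     # Build keyword mapping
--     keywords = {
--         "director": ["direct", "director", "film", "movie", "directed_by"],
--         "actor": ["star", "actor", "actress", "cast", "play", "starring", "played_by"],
--         "location": ["location", "place", "set", "filmed", "country", "city"],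
--         "time": ["year", "date", "when", "time", "released"],
--         "count": ["number", "total", "many", "count"],
--     }
--
--     # Get keywords for current question focus
--     focus_keywords = keywords.get(question_focus, [])
--
--     # Score relations based on relevance
--     scored_relations = []
--     for rel in relations:
--         rel_lower = rel.lower()
--         score = 0
--
--         # Check for keyword matches
--         for keyword in focus_keywords:
--             if keyword in rel_lower:
--                 score += 2
--
--         # Special rules
--         if question_focus == "director" and "direct" in rel_lower:
--             score += 3
--         elif question_focus == "actor" and any(
--             kw in rel_lower for kw in ["star", "play", "act"]
--         ):
--             score += 3
--
--         # Only include relations with a positive score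
--         if score > 0:
--             scored_relations.append((rel, score))
--
--     # Sort in descending order by score
--     scored_relations.sort(key=lambda x: x[1], reverse=True)
--
--     # Return list of relations
--     return [rel for rel, _ in scored_relations]
-- ===== SOURCE B (Python) =====
-- def find_relation_by_question(question_type, question_focus, relations):
--     """Score relations by keyword relevance, then emit them grouped by
--     distinct score in descending order (stable grouping) instead of sorting."""
--     keywords = {
--         "director": ["direct", "director", "film", "movie", "directed_by"],
--         "actor": ["star", "actor", "actress", "cast", "play", "starring", "played_by"],
--         "location": ["location", "place", "set", "filmed", "country", "city"],
--         "time": ["year", "date", "when", "time", "released"],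
--         "count": ["number", "total", "many", "count"],
--     }
--     kws = keywords.get(question_focus, [])
--
--     def score(rel):
--         rl = rel.lower()
--         s = 2 * sum(1 for kw in kws if kw in rl)
--         if question_focus == "director" and "direct" in rl:
--             s += 3
--         elif question_focus == "actor" and any(k in rl for k in ("star", "play", "act")):
--             s += 3
--         return s
--
--     scored = [(rel, s) for rel in relations if (s := score(rel)) > 0]
--     out = []
--     for s in sorted({sc for _, sc in scored}, reverse=True):
--         out.extend(rel for rel, sc in scored if sc == s)
--     return out
-- ===== Notes on version B (the rewrite author's own statement) =====
-- stated objective: alternative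
-- what changed: B keeps the scoring pass but replaces A's stable comparison sort of (rel, score) tuples by grouping: it collects the distinct positive scores, iterates them in descending order and concatenates, per score, the matching relations in encounter order.
import Mathlib
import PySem

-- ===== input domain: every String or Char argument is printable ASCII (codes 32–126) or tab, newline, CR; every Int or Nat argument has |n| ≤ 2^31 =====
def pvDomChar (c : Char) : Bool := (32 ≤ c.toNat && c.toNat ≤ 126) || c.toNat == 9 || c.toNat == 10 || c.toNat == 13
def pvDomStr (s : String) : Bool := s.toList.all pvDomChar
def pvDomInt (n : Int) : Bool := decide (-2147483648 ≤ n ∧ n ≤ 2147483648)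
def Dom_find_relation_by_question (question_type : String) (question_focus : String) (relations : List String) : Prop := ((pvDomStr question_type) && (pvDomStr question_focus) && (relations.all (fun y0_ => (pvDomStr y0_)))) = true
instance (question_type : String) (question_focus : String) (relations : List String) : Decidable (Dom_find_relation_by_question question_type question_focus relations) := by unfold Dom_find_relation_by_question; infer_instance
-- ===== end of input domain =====

-- B groups the positively scored relations by distinct score (descending) instead of sorting them; objective: alternative decomposition, same cost.

-- ===== PORT A =====
-- the keyword table (identical literal in both Python sources)
def pvKeywords : PySem.Dict String (List String) := PySem.Dict.mk
  [ ("director", ["direct", "director", "film", "movie", "directed_by"]),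
    ("actor", ["star", "actor", "actress", "cast", "play", "starring", "played_by"]),
    ("location", ["location", "place", "set", "filmed", "country", "city"]),
    ("time", ["year", "date", "when", "time", "released"]),
    ("count", ["number", "total", "many", "count"]) ]

def find_relation_by_question (question_type : String) (question_focus : String) (relations : List String) : List String :=
  let focus_keywords := pvKeywords.getD question_focus []
  let scored_relations : List (String × Int) := relations.foldl (fun acc rel =>
    let rel_lower := PySem.Str.lower rel
    let score : Int := focus_keywords.foldl (fun s keyword => if PySem.Str.isIn keyword rel_lower then s + 2 else s) 0
    let score : Int :=
      if question_focus = "director" ∧ PySem.Str.isIn "direct" rel_lower then score + 3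
      else if question_focus = "actor" ∧ (["star", "play", "act"].any fun kw => PySem.Str.isIn kw rel_lower) then score + 3
      else score
    if score > 0 then acc ++ [(rel, score)] else acc) []
  let sorted_relations := PySem.List.sorted scored_relations (fun x => x.2) true
  sorted_relations.map (fun x => x.1)

-- ===== PORT B =====
def pvScoreB (question_focus : String) (kws : List String) (rel : String) : Int :=
  let rl := PySem.Str.lower rel
  let s : Int := 2 * ((kws.map (fun kw => if PySem.Str.isIn kw rl then (1 : Int) else 0)).sum)
  if question_focus = "director" ∧ PySem.Str.isIn "direct" rl then s + 3
  else if question_focus = "actor" ∧ (["star", "play", "act"].any fun kw => PySem.Str.isIn kw rl) then s + 3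
  else s

def find_relation_by_question_alt (question_type : String) (question_focus : String) (relations : List String) : List String :=
  let kws := pvKeywords.getD question_focus []
  let scored := (relations.map (fun rel => (rel, pvScoreB question_focus kws rel))).filter (fun p => decide (p.2 > 0))
  let S := PySem.List.sorted (PySem.Set.ofList (scored.map (fun p => p.2))) (fun x => x) true
  S.foldl (fun out s => out ++ (scored.filter (fun p => p.2 == s)).map (fun p => p.1)) []

-- ===== PRECONDITION & SPEC =====
def Spec_find_relation_by_question (question_type : String) (question_focus : String) (relations : List String) (out : List String) : Prop := out = find_relation_by_question_alt question_type question_focus relations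
instance (question_type : String) (question_focus : String) (relations : List String) (out : List String) : Decidable (Spec_find_relation_by_question question_type question_focus relations out) := by unfold Spec_find_relation_by_question; infer_instance

-- ===== CLAIM (what is proved, stated in full; the proofs are below) =====
def Claim_equal_find_relation_by_question : Prop := ∀ (question_type : String) (question_focus : String) (relations : List String), Dom_find_relation_by_question question_type question_focus relations → Spec_find_relation_by_question question_type question_focus relations (find_relation_by_question question_type question_focus relations)

-- ===== LEMMAS AND PROOFS =====

-- A's "+2 per match" fold equals B's "2 * number of matches".
theorem pvScore_fold_eq (kws : List String) (c : String → Bool) (s0 : Int) :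
    kws.foldl (fun s keyword => if c keyword then s + 2 else s) s0
      = s0 + 2 * ((kws.map (fun kw => if c kw then (1 : Int) else 0)).sum) := by
  induction kws generalizing s0 with
  | nil => simp
  | cons k t ih =>
    simp only [List.foldl_cons, List.map_cons, List.sum_cons, ih]
    by_cases h : c k = true <;> simp [h]
    ring

theorem pvScoreA_eq (qf : String) (kws : List String) (rel : String) :
    (let rel_lower := PySem.Str.lower rel
     let score : Int := kws.foldl (fun s keyword => if PySem.Str.isIn keyword rel_lower then s + 2 else s) 0
     if qf = "director" ∧ PySem.Str.isIn "direct" rel_lower then score + 3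
     else if qf = "actor" ∧ (["star", "play", "act"].any fun kw => PySem.Str.isIn kw rel_lower) then score + 3
     else score) = pvScoreB qf kws rel := by
  simp only [pvScoreB, pvScore_fold_eq, zero_add]

-- the bucket concatenation: for each score of S in order, the elements of L with that score
def pvFlat (S : List Int) (L : List (String × Int)) : List (String × Int) :=
  S.flatMap (fun s => L.filter (fun p => p.2 == s))

theorem pvInsert_skip {α : Type} (before : α → α → Bool) (x : α) (B t : List α)
    (h : ∀ y ∈ B, before x y = false) :
    PySem.List.insertBy before x (B ++ t) = B ++ PySem.List.insertBy before x t := by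
  induction B with
  | nil => simp
  | cons y B ih =>
    have hy := h y (by simp)
    simp only [List.cons_append, PySem.List.insertBy, hy, Bool.false_eq_true, if_false]
    exact congrArg (y :: ·) (ih fun z hz => h z (by simp [hz]))

theorem pvInsert_front {α : Type} (before : α → α → Bool) (x : α) (t : List α)
    (h : ∀ y ∈ t, before x y = true) :
    PySem.List.insertBy before x t = x :: t := by
  cases t with
  | nil => rfl
  | cons y t => simp [PySem.List.insertBy, h y (by simp)]

theorem pvFlat_append_not_mem (S : List Int) (L : List (String × Int)) (x : String × Int)
    (hx : x.2 ∉ S) : pvFlat S (L ++ [x]) = pvFlat S L := by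
  unfold pvFlat
  apply List.flatMap_congr
  intro s hs
  have : (x.2 == s) = false := by
    simp only [beq_eq_false_iff_ne]; rintro rfl; exact hx hs
  simp [List.filter_append, this]

theorem pvInsert_flat (S : List Int) (hS : S.Pairwise (fun a b => b < a))
    (L : List (String × Int)) (x : String × Int) (hx : x.2 ∈ S) :
    PySem.List.insertBy (fun a b => decide (b.2 < a.2)) x (pvFlat S L) = pvFlat S (L ++ [x]) := by
  induction S generalizing L with
  | nil => cases hx
  | cons s S' ih =>
    have hlt : ∀ b ∈ S', b < s := fun b hb => (List.pairwise_cons.mp hS).1 b hb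
    have hS' : S'.Pairwise (fun a b => b < a) := (List.pairwise_cons.mp hS).2
    have hflat : pvFlat (s :: S') L = L.filter (fun p => p.2 == s) ++ pvFlat S' L := by
      simp [pvFlat]
    rw [hflat]
    have hskip : ∀ y ∈ L.filter (fun p => p.2 == s), (decide (y.2 < x.2)) = false := by
      intro y hy
      have hy2 : y.2 = s := by simpa using (List.of_mem_filter hy)
      have hxs : x.2 ≤ s := by
        rcases List.mem_cons.mp hx with h | h
        · exact le_of_eq h
        · exact le_of_lt (hlt _ h)
      simp [hy2]; omega
    rw [pvInsert_skip _ _ _ _ hskip]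
    by_cases hxs : x.2 = s
    · -- x joins the bucket of s: it goes before everything with a smaller score
      have hfront : ∀ y ∈ pvFlat S' L, (decide (y.2 < x.2)) = true := by
        intro y hy
        rcases List.mem_flatMap.mp hy with ⟨s', hs', hy'⟩
        have hy2 : y.2 = s' := by simpa using (List.of_mem_filter hy')
        have : s' < s := hlt _ hs'
        simp [hy2, hxs]; omega
      rw [pvInsert_front _ _ _ hfront]
      have hnot : x.2 ∉ S' := by
        intro h; exact absurd (hlt _ h) (by omega)
      have h1 : pvFlat (s :: S') (L ++ [x])
          = (L ++ [x]).filter (fun p => p.2 == s) ++ pvFlat S' (L ++ [x]) := by simp [pvFlat]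
      rw [h1, pvFlat_append_not_mem _ _ _ hnot, List.filter_append]
      simp [hxs]
    · -- x belongs to a later bucket
      have hx' : x.2 ∈ S' := by
        rcases List.mem_cons.mp hx with h | h
        · exact absurd h hxs
        · exact h
      rw [ih hS' L hx']
      have h1 : pvFlat (s :: S') (L ++ [x])
          = (L ++ [x]).filter (fun p => p.2 == s) ++ pvFlat S' (L ++ [x]) := by simp [pvFlat]
      rw [h1, List.filter_append]
      have : (x.2 == s) = false := by simp [hxs]
      simp [this]

-- stable descending sort by score = buckets of any strictly decreasing score list S
-- covering all scores, concatenated in the order of S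
theorem pvSorted_eq_flat (S : List Int) (hS : S.Pairwise (fun a b => b < a))
    (L : List (String × Int)) (hmem : ∀ p ∈ L, p.2 ∈ S) :
    PySem.List.sorted L (fun p => p.2) true = pvFlat S L := by
  induction L using List.reverseRecOn with
  | nil => simp [PySem.List.sorted, pvFlat]
  | append_singleton L x ih =>
    rw [PySem.List.sorted_rev_eq_foldl_insertBy, List.foldl_append, List.foldl_cons, List.foldl_nil,
      ← PySem.List.sorted_rev_eq_foldl_insertBy,
      ih (fun p hp => hmem p (by simp [hp])),
      pvInsert_flat S hS L x (hmem x (by simp))]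

theorem find_relation_by_question_eq (question_type question_focus : String) (relations : List String) :
    find_relation_by_question question_type question_focus relations
      = find_relation_by_question_alt question_type question_focus relations := by
  simp only [find_relation_by_question, find_relation_by_question_alt]
  set kws := pvKeywords.getD question_focus [] with hkws
  -- the two scored lists coincide
  have hsc : relations.foldl (fun acc rel =>
      let rel_lower := PySem.Str.lower rel
      let score : Int := kws.foldl (fun s keyword => if PySem.Str.isIn keyword rel_lower then s + 2 else s) 0
      let score : Int :=
        if question_focus = "director" ∧ PySem.Str.isIn "direct" rel_lower then score + 3
        else if question_focus = "actor" ∧ (["star", "play", "act"].any fun kw => PySem.Str.isIn kw rel_lower) then score + 3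
        else score
      if score > 0 then acc ++ [(rel, score)] else acc) ([] : List (String × Int))
      = (relations.map (fun rel => (rel, pvScoreB question_focus kws rel))).filter (fun p => decide (p.2 > 0)) := by
    have hbody : (fun (acc : List (String × Int)) rel =>
        let rel_lower := PySem.Str.lower rel
        let score : Int := kws.foldl (fun s keyword => if PySem.Str.isIn keyword rel_lower then s + 2 else s) 0
        let score : Int :=
          if question_focus = "director" ∧ PySem.Str.isIn "direct" rel_lower then score + 3
          else if question_focus = "actor" ∧ (["star", "play", "act"].any fun kw => PySem.Str.isIn kw rel_lower) then score + 3
          else score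
        if score > 0 then acc ++ [(rel, score)] else acc)
        = (fun acc rel => if (fun r => decide (pvScoreB question_focus kws r > 0)) rel
            then acc ++ [(fun r => (r, pvScoreB question_focus kws r)) rel] else acc) := by
      funext acc rel
      rw [show (let rel_lower := PySem.Str.lower rel
        let score : Int := kws.foldl (fun s keyword => if PySem.Str.isIn keyword rel_lower then s + 2 else s) 0
        let score : Int :=
          if question_focus = "director" ∧ PySem.Str.isIn "direct" rel_lower then score + 3
          else if question_focus = "actor" ∧ (["star", "play", "act"].any fun kw => PySem.Str.isIn kw rel_lower) then score + 3
          else score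
        if score > 0 then acc ++ [(rel, score)] else acc)
        = (if pvScoreB question_focus kws rel > 0 then acc ++ [(rel, pvScoreB question_focus kws rel)] else acc)
        from by rw [← pvScoreA_eq question_focus kws rel]]
      by_cases h : pvScoreB question_focus kws rel > 0 <;> simp [h]
    rw [hbody, PySem.List.foldl_append_if, List.nil_append, List.filter_map]
    rfl
  rw [hsc]
  set L := (relations.map (fun rel => (rel, pvScoreB question_focus kws rel))).filter (fun p => decide (p.2 > 0)) with hL
  set S := PySem.List.sorted (PySem.Set.ofList (L.map (fun p => p.2))) (fun x => x) true with hSdef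
  -- properties of S
  have hperm : S.Perm (PySem.Set.ofList (L.map (fun p => p.2))) := PySem.List.sorted_perm _ _ _
  have hnd : S.Nodup := hperm.symm.nodup (PySem.Set.nodup_ofList _)
  have hle : S.Pairwise (fun a b => b ≤ a) := PySem.List.sorted_pairwise_rev _ _
  have hS : S.Pairwise (fun a b => b < a) := by
    have := hle.and hnd
    exact this.imp (fun h => lt_of_le_of_ne h.1 (Ne.symm h.2))
  have hmem : ∀ p ∈ L, p.2 ∈ S := by
    intro p hp
    rw [hSdef, PySem.List.mem_sorted, PySem.Set.mem_ofList]
    exact List.mem_map.mpr ⟨p, hp, rfl⟩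
  rw [pvSorted_eq_flat S hS L hmem, PySem.List.foldl_append_eq_flatMap, List.nil_append,
    pvFlat, List.map_flatMap]

-- ===== VERDICT (by name: the statement is the Claim_ definition above) =====
theorem find_relation_by_question_spec : Claim_equal_find_relation_by_question := by
  intro qt qf rels _
  exact find_relation_by_question_eq qt qf rels
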